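-- pv_equiv track=rewrite | github.com/vaezim/Advent-of-Code | 2025/day02/utils.py | _IsInvalid2
-- ===== SOURCE A (Python) =====
-- def _IsInvalid2(a):
--     str_a = str(a)
--     for r in range(1,len(str_a)):
--         if len(str_a) % r != 0:
--             continue
--         curr = str_a[:r]
--         isInvalid = True
--         for i in range(0, len(str_a), r):
--             if str_a[i:i+r] != curr:
--                 isInvalid = False
--                 break
--         if isInvalid:
--             return True
--     return False
-- ===== SOURCE B (Python) =====
-- def _IsInvalid2(a):
--     s = str(a)
--     return s in (s + s)[1:-1]
-- ===== Notes on version B (the rewrite author's own statement) =====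
-- stated objective: idiomatic
-- what changed: Replaced A's divisor loop with an inner block-comparison scan by the standard string-doubling periodicity idiom: str(a) is a repeated block iff it occurs inside (s+s)[1:-1], a single substring-membership test.
import Mathlib
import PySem

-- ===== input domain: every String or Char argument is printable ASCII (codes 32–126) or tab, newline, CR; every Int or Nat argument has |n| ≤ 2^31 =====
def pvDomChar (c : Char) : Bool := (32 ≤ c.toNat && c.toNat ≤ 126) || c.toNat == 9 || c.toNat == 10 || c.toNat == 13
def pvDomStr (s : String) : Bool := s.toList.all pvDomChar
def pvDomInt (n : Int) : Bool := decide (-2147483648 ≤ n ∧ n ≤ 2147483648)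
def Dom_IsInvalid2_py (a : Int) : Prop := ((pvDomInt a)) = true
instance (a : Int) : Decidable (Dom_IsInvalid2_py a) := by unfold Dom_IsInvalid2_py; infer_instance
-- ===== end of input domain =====

-- B replaces A's divisor loop with inner block scan by the string-doubling periodicity idiom
-- `s in (s + s)[1:-1]` (objective: idiomatic; not claimed faster).

-- ===== PORT A =====
-- A's body on the decimal string str_a = str(a): loop over r in range(1, len), skip
-- non-divisors, compare every block str_a[i:i+r] (i in range(0, len, r)) with str_a[:r].
def pvStrA (str_a : List Char) : Bool :=
  (PySem.List.pyRange 1 (PySem.Chars.len str_a) 1).any fun r =>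
    if PySem.Int.mod (PySem.Chars.len str_a) r != 0 then false
    else
      let curr := PySem.List.slice str_a none (some r)
      (PySem.List.pyRange 0 (PySem.Chars.len str_a) r).all fun i =>
        PySem.List.slice str_a (some i) (some (i + r)) == curr

def IsInvalid2_py (a : Int) : Bool := pvStrA (PySem.Int.toChars a)

-- ===== PORT B =====
-- B's body on s = str(a): `s in (s + s)[1:-1]`.
def pvStrB (s : List Char) : Bool :=
  PySem.Chars.isIn s (PySem.List.slice (s ++ s) (some 1) (some (-1)))

def IsInvalid2_py_alt (a : Int) : Bool := pvStrB (PySem.Int.toChars a)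

-- ===== PRECONDITION & SPEC =====
def Spec_IsInvalid2_py (a : Int) (out : Bool) : Prop := out = IsInvalid2_py_alt a
instance (a : Int) (out : Bool) : Decidable (Spec_IsInvalid2_py a out) := by unfold Spec_IsInvalid2_py; infer_instance

-- ===== CLAIM (what is proved, stated in full; the proofs are below) =====
def Claim_equal_IsInvalid2_py : Prop := ∀ (a : Int), Dom_IsInvalid2_py a → Spec_IsInvalid2_py a (IsInvalid2_py a)

-- ===== LEMMAS AND PROOFS =====

-- str(a) is never the empty string.
theorem pv_toDigitsCore_len_ge (b : ℕ) : ∀ (f n : ℕ) (ds : List Char),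
    ds.length ≤ (Nat.toDigitsCore b f n ds).length := by
  intro f
  induction f with
  | zero => intro n ds; simp [Nat.toDigitsCore]
  | succ f ih =>
    intro n ds
    simp only [Nat.toDigitsCore]
    split
    · simp
    · exact le_trans (by simp) (ih _ _)

theorem pv_toChars_ne_nil (a : Int) : PySem.Int.toChars a ≠ [] := by
  have hcore : ∀ n : ℕ, Nat.toDigits 10 n ≠ [] := by
    intro n
    have h := pv_toDigitsCore_len_ge 10 n (n / 10) [Nat.digitChar (n % 10)]
    unfold Nat.toDigits Nat.toDigitsCore
    intro hnil
    by_cases hz : n / 10 = 0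
    · simp [hz] at hnil
    · simp [hz] at hnil
      rw [hnil] at h
      simp at h
  unfold PySem.Int.toChars
  split
  · simp
  · exact hcore _

-- rotation-fixing amounts: closure properties
theorem pv_rot_mul (s : List Char) (a : ℕ) (ha : s.rotate a = s) :
    ∀ t : ℕ, s.rotate (a * t) = s := by
  intro t
  induction t with
  | zero => simp
  | succ t ih =>
    have : s.rotate (a * t + a) = s := by
      rw [← List.rotate_rotate, ih, ha]
    simpa [Nat.mul_succ] using this

theorem pv_rot_cancel (s : List Char) (a b : ℕ) (ha : s.rotate a = s)
    (hab : s.rotate (a + b) = s) : s.rotate b = s := by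
  rw [← List.rotate_rotate, ha] at hab
  exact hab

theorem pv_rot_mod (s : List Char) (a b : ℕ) (ha : s.rotate a = s)
    (hb : s.rotate b = s) : s.rotate (b % a) = s := by
  have hmul : s.rotate (a * (b / a)) = s := pv_rot_mul s a ha _
  have : a * (b / a) + b % a = b := Nat.div_add_mod b a
  exact pv_rot_cancel s _ _ hmul (by rw [this]; exact hb)

theorem pv_rot_gcd (s : List Char) : ∀ (a b : ℕ), s.rotate a = s → s.rotate b = s →
    s.rotate (Nat.gcd a b) = s := by
  intro a
  induction a using Nat.strong_induction_on with
  | _ a ih =>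
    intro b ha hb
    match a, ha with
    | 0, _ => simpa using hb
    | (a + 1), ha =>
      rw [Nat.gcd_rec]
      exact ih _ (Nat.mod_lt b (Nat.succ_pos a)) _ (pv_rot_mod s _ _ ha hb) ha

-- power form:  s = t ++ t ++ … ++ t  (m copies), t = s.take r
theorem pv_pow_of_rot (r : ℕ) : ∀ (m : ℕ) (s : List Char),
    s.length = r * m → s.drop r ++ s.take r = s →
    s = (List.replicate m (s.take r)).flatten := by
  intro m
  induction m with
  | zero =>
    intro s hlen _
    have : s = [] := List.eq_nil_of_length_eq_zero (by simpa using hlen)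
    simp [this]
  | succ m ih =>
    intro s hlen hrot
    have hrlen : r ≤ s.length := by rw [hlen]; nlinarith
    have htake : (s.take r).length = r := by simp [hrlen]
    rcases Nat.eq_zero_or_pos m with hm | hm
    · subst hm
      have : s.drop r = [] := by
        apply List.eq_nil_of_length_eq_zero
        simp [hlen]
      calc s = s.take r ++ s.drop r := (List.take_append_drop r s).symm
        _ = (List.replicate 1 (s.take r)).flatten := by simp [this]
    · -- m ≥ 1 : the tail u = s.drop r again satisfies the hypotheses
      set t := s.take r with ht
      set u := s.drop r with hu
      have hsu : s = t ++ u := (List.take_append_drop r s).symm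
      have hcomm : u ++ t = t ++ u := by rw [← hsu]; exact hrot
      have hulen : u.length = r * m := by
        rw [hu, List.length_drop, hlen, Nat.mul_succ]
        omega
      have hru : r ≤ u.length := by rw [hulen]; nlinarith
      have hut : u.take r = t := by
        have h1 : (u ++ t).take r = u.take r := by
          rw [List.take_append, Nat.sub_eq_zero_of_le hru]; simp
        have h2 : (t ++ u).take r = t := by
          rw [List.take_append]; simp [← htake]
        rw [hcomm, h2] at h1
        exact h1.symm
      have hurot : u.drop r ++ u.take r = u := by
        have hdec : u = t ++ u.drop r := by
          conv_lhs => rw [← List.take_append_drop r u, hut]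
        have : t ++ (t ++ u.drop r) = (t ++ u.drop r) ++ t := by
          rw [← hdec, hcomm]
        have hcancel : t ++ u.drop r = u.drop r ++ t := by
          have := this
          rwa [List.append_assoc, List.append_cancel_left_eq] at this
        rw [hut, ← hcancel, ← hdec]
      have hiu := ih u hulen hurot
      rw [hut] at hiu
      calc s = t ++ u := hsu
        _ = t ++ (List.replicate m t).flatten := by rw [← hiu]
        _ = (List.replicate (m + 1) t).flatten := by simp [List.replicate_succ]

theorem pv_rot_of_pow (r m : ℕ) (t : List Char) (ht : t.length = r) (hm : 0 < m)
    (s : List Char) (hs : s = (List.replicate m t).flatten) :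
    s.drop r ++ s.take r = s := by
  obtain ⟨m', rfl⟩ : ∃ m', m = m' + 1 := ⟨m - 1, (Nat.succ_pred_eq_of_pos hm).symm⟩
  have hflat : s = t ++ (List.replicate m' t).flatten := by
    rw [hs]; simp [List.replicate_succ]
  have hdrop : s.drop r = (List.replicate m' t).flatten := by
    rw [hflat, List.drop_append]; simp [← ht]
  have htak : s.take r = t := by
    rw [hflat, List.take_append]; simp [← ht]
  rw [hdrop, htak, hs, List.replicate_succ']
  simp

theorem pv_drop_flatten_replicate (t : List Char) (r : ℕ) (ht : t.length = r) :
    ∀ (j m : ℕ), j ≤ m →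
      ((List.replicate m t).flatten).drop (r * j) = (List.replicate (m - j) t).flatten := by
  intro j
  induction j with
  | zero => intro m _; simp
  | succ j ih =>
    intro m hj
    obtain ⟨m', rfl⟩ : ∃ m', m = m' + 1 := ⟨m - 1, by omega⟩
    have hstep : ((List.replicate (m' + 1) t).flatten).drop r = (List.replicate m' t).flatten := by
      rw [List.replicate_succ, List.flatten_cons, List.drop_append]
      simp [← ht]
    have hsplit : ∀ v : List Char, v.drop (r * (j + 1)) = (v.drop r).drop (r * j) := by
      intro v
      rw [List.drop_drop]
      congr 1
      ring
    rw [Nat.succ_sub_succ, hsplit, hstep, ih m' (by omega)]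

theorem pv_blocks_of_pow (t : List Char) (r : ℕ) (ht : t.length = r)
    (m : ℕ) (s : List Char) (hs : s = (List.replicate m t).flatten) :
    ∀ j < m, (s.drop (r * j)).take r = t := by
  intro j hj
  rw [hs, pv_drop_flatten_replicate t r ht j m (le_of_lt hj)]
  obtain ⟨k, hk⟩ : ∃ k, m - j = k + 1 := ⟨m - j - 1, by omega⟩
  rw [hk, List.replicate_succ, List.flatten_cons, List.take_append]
  simp [← ht]

theorem pv_pow_of_blocks (r : ℕ) : ∀ (m : ℕ) (s : List Char),
    s.length = r * m → (∀ j < m, (s.drop (r * j)).take r = s.take r) →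
    s = (List.replicate m (s.take r)).flatten := by
  intro m
  induction m with
  | zero =>
    intro s hlen _
    have : s = [] := List.eq_nil_of_length_eq_zero (by simpa using hlen)
    simp [this]
  | succ m ih =>
    intro s hlen hblocks
    have hrlen : r ≤ s.length := by rw [hlen]; nlinarith
    set t := s.take r with ht
    set u := s.drop r with hu
    have hsu : s = t ++ u := (List.take_append_drop r s).symm
    have hulen : u.length = r * m := by
      rw [hu, List.length_drop, hlen, Nat.mul_succ]
      omega
    have hub : ∀ j < m, (u.drop (r * j)).take r = u.take r := by
      intro j hj
      have h1 : u.drop (r * j) = s.drop (r * (j + 1)) := by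
        rw [hu, List.drop_drop]
        congr 1
        ring
      have h2 : u.take r = (s.drop (r * 1)).take r := by
        rw [Nat.mul_one, hu]
      rw [h1, h2, hblocks (j + 1) (by omega), hblocks 1 (by omega)]
    rcases Nat.eq_zero_or_pos m with hm | hm
    · subst hm
      have hunil : u = [] := by
        apply List.eq_nil_of_length_eq_zero
        simp [hulen]
      calc s = t ++ u := hsu
        _ = (List.replicate 1 t).flatten := by simp [hunil]
    · have hut : u.take r = t := by
        have h2 : u.take r = (s.drop (r * 1)).take r := by
          rw [Nat.mul_one, hu]
        rw [h2, hblocks 1 (by omega)]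
      have hiu := ih u hulen hub
      rw [hut] at hiu
      calc s = t ++ u := hsu
        _ = t ++ (List.replicate m t).flatten := by rw [← hiu]
        _ = (List.replicate (m + 1) t).flatten := by simp [List.replicate_succ]

-- block equality over all blocks is exactly rotation-invariance, for a divisor r
theorem pv_blocks_iff_rot (s : List Char) (r : ℕ) (hr : 0 < r) (hrn : r < s.length)
    (hdvd : r ∣ s.length) :
    (∀ j < s.length / r, (s.drop (r * j)).take r = s.take r) ↔ s.rotate r = s := by
  have hrle : r ≤ s.length := le_of_lt hrn
  have hmul : r * (s.length / r) = s.length := Nat.mul_div_cancel' hdvd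
  have htlen : (s.take r).length = r := by simp [hrle]
  constructor
  · intro hb
    have hpow := pv_pow_of_blocks r (s.length / r) s hmul.symm hb
    have hm : 0 < s.length / r := Nat.div_pos hrle hr
    have hda := pv_rot_of_pow r (s.length / r) (s.take r) htlen hm s hpow
    rw [List.rotate_eq_drop_append_take hrle]
    exact hda
  · intro hrot
    have hda : s.drop r ++ s.take r = s := by
      rw [← List.rotate_eq_drop_append_take hrle]; exact hrot
    have hpow := pv_pow_of_rot r (s.length / r) s hmul.symm hda
    intro j hj
    rw [pv_blocks_of_pow (s.take r) r htlen (s.length / r) s hpow j hj]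

-- characterisation of A's loop
theorem pv_A_iff (s : List Char) :
    pvStrA s = true ↔
      ∃ r : ℕ, 1 ≤ r ∧ r < s.length ∧ r ∣ s.length ∧ s.rotate r = s := by
  unfold pvStrA
  rw [List.any_eq_true]
  constructor
  · rintro ⟨rI, hmem, hbody⟩
    rw [PySem.Chars.len_eq, PySem.List.mem_pyRange_one] at hmem
    obtain ⟨h1, h2⟩ := hmem
    obtain ⟨r, rfl⟩ : ∃ r : ℕ, rI = (r : ℤ) := ⟨rI.toNat, (Int.toNat_of_nonneg (by omega)).symm⟩
    have hr1 : 1 ≤ r := by exact_mod_cast h1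
    have hrn : r < s.length := by exact_mod_cast h2
    simp only [PySem.Chars.len_eq] at hbody
    have hmod : PySem.Int.mod (s.length : ℤ) (r : ℤ) = 0 := by
      by_contra h0
      simp [bne_iff_ne] at hbody
      exact h0 ((PySem.Int.mod_eq_zero_iff_dvd _ _).mpr hbody.1)
    have hdvdN : r ∣ s.length := by
      exact_mod_cast (PySem.Int.mod_eq_zero_iff_dvd _ _).mp hmod
    simp only [hmod, bne_self_eq_false, Bool.false_eq_true, if_false, List.all_eq_true] at hbody
    have hblocks : ∀ j < s.length / r, (s.drop (r * j)).take r = s.take r := by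
      intro j hj
      have hjlt : r * j + r ≤ s.length := by
        have h3 : r * (j + 1) ≤ r * (s.length / r) :=
          Nat.mul_le_mul_left r (Nat.succ_le_of_lt hj)
        rw [Nat.mul_div_cancel' hdvdN, Nat.mul_succ] at h3
        exact h3
      have hjmem : ((r * j : ℕ) : ℤ) ∈ PySem.List.pyRange 0 (s.length : ℤ) (r : ℤ) := by
        rw [PySem.List.mem_pyRange_iff_of_pos (by omega : (0 : ℤ) < (r : ℤ))]
        have hlt : r * j < s.length :=
          lt_of_lt_of_le (Nat.lt_add_of_pos_right (by omega)) hjlt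
        refine ⟨by positivity, by exact_mod_cast hlt, ⟨(j : ℤ), by push_cast; ring⟩⟩
      have hbl := hbody _ hjmem
      rw [beq_iff_eq, PySem.List.slice_to s (by positivity)] at hbl
      rw [PySem.List.slice_toNat s (by positivity) (by positivity)] at hbl
      have e1 : ((r * j : ℕ) : ℤ).toNat = r * j := by generalize r * j = n; omega
      have e2 : (((r * j : ℕ) : ℤ) + (r : ℤ)).toNat = r * j + r := by generalize r * j = n; omega
      have e3 : ((r : ℕ) : ℤ).toNat = r := by omega
      rw [e1, e2, e3, Nat.add_sub_cancel_left] at hbl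
      exact hbl
    exact ⟨r, hr1, hrn, hdvdN, (pv_blocks_iff_rot s r (by omega) hrn hdvdN).mp hblocks⟩
  · rintro ⟨r, hr1, hrn, hdvdN, hrot⟩
    refine ⟨(r : ℤ), ?_, ?_⟩
    · rw [PySem.Chars.len_eq, PySem.List.mem_pyRange_one]
      exact ⟨by exact_mod_cast hr1, by exact_mod_cast hrn⟩
    · simp only [PySem.Chars.len_eq]
      have hmod : PySem.Int.mod (s.length : ℤ) (r : ℤ) = 0 :=
        (PySem.Int.mod_eq_zero_iff_dvd _ _).mpr (by exact_mod_cast hdvdN)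
      simp only [hmod, bne_self_eq_false, Bool.false_eq_true, if_false, List.all_eq_true]
      intro i hi
      rw [PySem.List.mem_pyRange_iff_of_pos (by omega : (0 : ℤ) < (r : ℤ))] at hi
      obtain ⟨hi0, hin, jI, hj⟩ := hi
      rw [sub_zero] at hj
      have hjI0 : 0 ≤ jI := by
        by_contra hneg
        push_neg at hneg
        have hneg2 : (r : ℤ) * jI < 0 := mul_neg_of_pos_of_neg (by omega) hneg
        linarith
      obtain ⟨j, rfl⟩ : ∃ j : ℕ, jI = (j : ℤ) := ⟨jI.toNat, (Int.toNat_of_nonneg hjI0).symm⟩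
      have hiN : i = ((r * j : ℕ) : ℤ) := by rw [hj]; push_cast; ring
      subst hiN
      have hjlt : j < s.length / r := by
        have hlt : r * j < s.length := by exact_mod_cast hin
        have hlt2 : r * j < r * (s.length / r) := by
          rw [Nat.mul_div_cancel' hdvdN]; exact hlt
        exact Nat.lt_of_mul_lt_mul_left hlt2
      rw [beq_iff_eq, PySem.List.slice_to s (by positivity)]
      rw [PySem.List.slice_toNat s (by positivity) (by positivity)]
      have e1 : ((r * j : ℕ) : ℤ).toNat = r * j := by generalize r * j = n; omega
      have e2 : (((r * j : ℕ) : ℤ) + (r : ℤ)).toNat = r * j + r := by generalize r * j = n; omega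
      have e3 : ((r : ℕ) : ℤ).toNat = r := by omega
      rw [e1, e2, e3, Nat.add_sub_cancel_left]
      exact (pv_blocks_iff_rot s r (by omega) hrn hdvdN).mpr hrot j hjlt

-- a copy of s sits inside (s ++ s) at offset k iff rotating by k fixes s
theorem pv_prefix_drop_iff (s : List Char) (k : ℕ) (hkn : k ≤ s.length) :
    s <+: (s ++ s).drop k ↔ s.rotate k = s := by
  have hd : (s ++ s).drop k = s.drop k ++ s := by
    rw [List.drop_append, Nat.sub_eq_zero_of_le hkn]
    simp
  have hlen : (s.drop k).length = s.length - k := by simp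
  have h1 : (s.drop k).take s.length = s.drop k :=
    List.take_of_length_le (by simp)
  rw [hd, List.prefix_iff_eq_take, List.take_append, h1, hlen,
    Nat.sub_sub_self hkn, ← List.rotate_eq_drop_append_take hkn]
  exact eq_comm

-- characterisation of B's membership test
theorem pv_B_iff (s : List Char) (hs : s ≠ []) :
    pvStrB s = true ↔ ∃ k : ℕ, 1 ≤ k ∧ k < s.length ∧ s.rotate k = s := by
  have hn : 0 < s.length := by
    cases s
    · simp at hs
    · simp
  unfold pvStrB
  rw [← PySem.Chars.exists_prefix_drop_iff_isIn]
  have ht : PySem.List.slice (s ++ s) (some 1) (some (-1))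
      = ((s ++ s).drop 1).take (2 * s.length - 2) := by
    simp only [PySem.List.slice, PySem.List.clampIdx_neg_one]
    norm_num [PySem.List.clampIdx]
    rw [min_eq_left (by omega), ← List.drop_one]
    congr 1
    omega
  rw [ht]
  constructor
  · rintro ⟨j, hpre⟩
    rw [List.drop_take, List.prefix_take_iff, List.drop_drop] at hpre
    obtain ⟨hpre, hlen⟩ := hpre
    rw [Nat.add_comm 1 j] at hpre
    refine ⟨j + 1, by omega, by omega, ?_⟩
    exact (pv_prefix_drop_iff s (j + 1) (by omega)).mp hpre
  · rintro ⟨k, hk1, hkn, hrot⟩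
    refine ⟨k - 1, ?_⟩
    rw [List.drop_take, List.prefix_take_iff, List.drop_drop]
    rw [show 1 + (k - 1) = k by omega]
    exact ⟨(pv_prefix_drop_iff s k (by omega)).mpr hrot, by omega⟩

theorem pv_bridge (s : List Char) :
    (∃ r : ℕ, 1 ≤ r ∧ r < s.length ∧ r ∣ s.length ∧ s.rotate r = s) ↔
      (∃ k : ℕ, 1 ≤ k ∧ k < s.length ∧ s.rotate k = s) := by
  constructor
  · rintro ⟨r, h1, h2, _, h4⟩; exact ⟨r, h1, h2, h4⟩
  · rintro ⟨k, h1, h2, h3⟩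
    refine ⟨Nat.gcd k s.length, ?_, ?_, Nat.gcd_dvd_right _ _, ?_⟩
    · exact Nat.succ_le_of_lt (Nat.gcd_pos_of_pos_left _ (by omega))
    · exact lt_of_le_of_lt (Nat.gcd_le_left _ (by omega)) h2
    · exact pv_rot_gcd s k s.length h3 (List.rotate_length s)

theorem pv_core (s : List Char) (hs : s ≠ []) : pvStrA s = pvStrB s := by
  have h := (pv_A_iff s).trans ((pv_bridge s).trans (pv_B_iff s hs).symm)
  cases hA : pvStrA s <;> cases hB : pvStrB s <;> simp_all

-- ===== VERDICT (by name: the statement is the Claim_ definition above) =====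
theorem IsInvalid2_py_spec : Claim_equal_IsInvalid2_py := by
  intro a _
  unfold Spec_IsInvalid2_py IsInvalid2_py IsInvalid2_py_alt
  exact pv_core _ (pv_toChars_ne_nil a)
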